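-- pv_equiv track=rewrite | github.com/kimbap918/TIL | python/PythonWorkspace/연습장/24265.py | MenOfPassion
-- ===== SOURCE A (Python) =====
-- def MenOfPassion(A, n):
--     sum = 0
--     for i in range(1, n): # 1, 2, 3, 4, 5
--         A.append(1)
--         for j in range(i+1, n+1):
--             A.append(1)
--
--     for i in range(1, n): # 1, 2, 3, 4, 5
--         for j in range(i+1, n+1):
--             sum += A[i] * A[j]
--
--     return sum
-- ===== SOURCE B (Python) =====
-- def MenOfPassion(A, n):
--     # Same observable mutation as A: A gains n*(n+1)//2 - 1 ones when n >= 2.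
--     if n < 2:
--         return 0
--     A.extend([1] * (n * (n + 1) // 2 - 1))
--     total = 0
--     run = 0
--     for v in A[1:n + 1]:
--         total += run * v
--         run += v
--     return total
-- ===== Notes on version B (the rewrite author's own statement) =====
-- stated objective: alternative
-- what changed: The append loops are replaced by a single closed-form extend and the nested pair summation by a single prefix-sum pass (total += run*v; run += v) over A[1:n+1]; the mandatory appending of n*(n+1)//2 - 1 ones still dominates both programs, so overall cost is unchanged. Pre_ excludes only A = [] with n = 2, the sole input where A raises IndexError because the mutated list is still too short for the reads.
import Mathlib
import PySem

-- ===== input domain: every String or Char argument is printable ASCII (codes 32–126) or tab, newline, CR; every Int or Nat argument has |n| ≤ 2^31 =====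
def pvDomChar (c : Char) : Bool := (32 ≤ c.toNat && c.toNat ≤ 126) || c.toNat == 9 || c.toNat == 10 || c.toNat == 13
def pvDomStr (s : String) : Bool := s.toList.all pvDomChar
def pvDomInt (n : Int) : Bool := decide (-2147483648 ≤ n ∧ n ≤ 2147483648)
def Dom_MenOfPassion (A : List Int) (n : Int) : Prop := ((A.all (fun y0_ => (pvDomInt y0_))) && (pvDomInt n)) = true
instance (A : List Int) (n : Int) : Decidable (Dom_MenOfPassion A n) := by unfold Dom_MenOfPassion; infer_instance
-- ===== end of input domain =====

-- B replaces A's append loops by one closed-form extend and A's nested pair summation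
-- by a single prefix-sum pass. The equivalence proved here is about the return value;
-- both Pythons perform the same in-place mutation of A (n*(n+1)//2 - 1 ones appended when n >= 2).

-- ===== PORT A =====
-- literal transliteration: the two append loops build the mutated list A1, then the
-- nested loops sum A1[i]*A1[j]; A[i] is PySem.List.pyGetD A1 i 0 (the default 0 is
-- never read on inputs admitted by Pre_, where Python does not raise).
def MenOfPassion (A : List Int) (n : Int) : Int :=
  let A1 := (PySem.List.pyRange 1 n 1).foldl (fun acc i =>
      (PySem.List.pyRange (i+1) (n+1) 1).foldl (fun a2 _ => a2 ++ [(1:Int)]) (acc ++ [(1:Int)])) A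
  (PySem.List.pyRange 1 n 1).foldl (fun s i =>
      (PySem.List.pyRange (i+1) (n+1) 1).foldl (fun s2 j =>
          s2 + PySem.List.pyGetD A1 i 0 * PySem.List.pyGetD A1 j 0) s) 0

-- ===== PORT B =====
-- literal transliteration of Source B: early return for n < 2, one extend,
-- then one pass with the two accumulators (total, run) over the slice A[1:n+1].
def MenOfPassion_alt (A : List Int) (n : Int) : Int :=
  if n < 2 then 0
  else
    let A' := A ++ PySem.List.pyRepeat [(1:Int)] (PySem.Int.floordiv (n * (n + 1)) 2 - 1)
    let vals := PySem.List.slice A' (some 1) (some (n + 1))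
    (vals.foldl (fun (p : Int × Int) v => (p.1 + p.2 * v, p.2 + v)) ((0:Int), (0:Int))).1

-- ===== PRECONDITION & SPEC =====
-- Pre_ excludes only A = [] with n = 2: the sole input where A's mutated list is
-- still too short for the reads A[i]/A[j] and the Python A raises IndexError.
def Pre_MenOfPassion (A : List Int) (n : Int) : Prop := ¬ (A = [] ∧ n = 2)
instance (A : List Int) (n : Int) : Decidable (Pre_MenOfPassion A n) := by unfold Pre_MenOfPassion; infer_instance
def pvWitness_MenOfPassion : List Int × Int := ([2, 3, 4], 3)

def Spec_MenOfPassion (A : List Int) (n : Int) (out : Int) : Prop := out = MenOfPassion_alt A n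
instance (A : List Int) (n : Int) (out : Int) : Decidable (Spec_MenOfPassion A n out) := by unfold Spec_MenOfPassion; infer_instance

-- ===== CLAIM (what is proved, stated in full; the proofs are below) =====
def Claim_equal_MenOfPassion : Prop := ∀ (A : List Int) (n : Int), Dom_MenOfPassion A n → Pre_MenOfPassion A n → Spec_MenOfPassion A n (MenOfPassion A n)

-- ===== LEMMAS AND PROOFS =====

-- sum of xs[i]*xs[j] over index pairs i < j, structurally
def pairsum : List Int → Int
  | [] => 0
  | v :: vs => v * vs.sum + pairsum vs

theorem flatMap_rep (l : List Int) (c : Int → Nat) :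
    l.flatMap (fun i => List.replicate (c i) (1:Int)) = List.replicate ((l.map c).sum) 1 := by
  induction l with
  | nil => simp
  | cons x xs ih =>
    simp only [List.flatMap_cons, ih, List.map_cons, List.sum_cons, List.replicate_add]

theorem gauss (M : Nat) : ((List.range M).map (fun k => M - k + 1)).sum = (M+1)*(M+2)/2 - 1 := by
  cases M with
  | zero => simp
  | succ m =>
    set M := m + 1
    have hb : ((List.range M).map (fun k => M - k + 1)).sum = ∑ k ∈ Finset.range M, (M - k + 1) := by
      exact Nat.add_zero _
    have hr : ∑ k ∈ Finset.range M, (M - k + 1) = ∑ k ∈ Finset.range M, (k + 2) := by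
      rw [← Finset.sum_range_reflect (fun j => j + 2) M]
      apply Finset.sum_congr rfl
      intro k hk
      simp only [Finset.mem_range] at hk
      omega
    have hs2 : ∑ k ∈ Finset.range M, (k + 2) = (∑ k ∈ Finset.range M, k) + 2*M := by
      rw [Finset.sum_add_distrib]
      simp [mul_comm]
    have h1 := Finset.sum_range_id_mul_two M
    have hsub : M*(M-1) = M*M - M := by rw [Nat.mul_sub]; ring_nf
    have hM : M ≤ M*M := Nat.le_mul_of_pos_left M (by omega)
    have h2 : (M+1)*(M+2) = M*M + 3*M + 2 := by ring
    rw [hb, hr, hs2, h2]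
    rw [hsub] at h1
    generalize M*M = x at h1 hM ⊢
    omega

theorem getD_seg (xs : List Int) (j c : Nat) (h : j + c ≤ xs.length) :
    (xs.drop j).take c = (List.range c).map (fun l => xs.getD (j+l) 0) := by
  apply List.ext_getElem
  · simp; omega
  · intro i h1 h2
    simp at h1 h2 ⊢
    rw [List.getElem?_eq_getElem (by omega)]
    rfl

theorem pairsum_spec (vals : List Int) :
    pairsum vals
      = ((List.range vals.length).map
          (fun k => vals.getD k 0 * (vals.drop (k+1)).sum)).sum := by
  induction vals with
  | nil => simp [pairsum]
  | cons v vs ih =>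
    simp [pairsum, List.range_succ_eq_map, List.map_map, ih]
    apply congrArg
    apply List.map_congr_left
    intro k hk
    simp

theorem key (C : List Int) (M : Nat) (h : M + 2 ≤ C.length) :
    ((List.range M).map (fun k =>
       ((List.range (M - k)).map (fun l => C.getD (1+k) 0 * C.getD (k+2+l) 0)).sum)).sum
    = pairsum ((C.drop 1).take (M+1)) := by
  set vals := (C.drop 1).take (M+1) with hv
  have hlen : vals.length = M+1 := by simp [hv]; omega
  rw [pairsum_spec, hlen, List.range_succ, List.map_append, List.sum_append]
  have hlast : vals.drop (M+1) = [] := by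
    apply List.drop_eq_nil_of_le; omega
  simp only [List.map_cons, List.map_nil, hlast, List.sum_nil, mul_zero, List.sum_cons, add_zero]
  apply congrArg
  apply List.map_congr_left
  intro k hk; simp only [List.mem_range] at hk
  have h1 : vals.getD k 0 = C.getD (1+k) 0 := by
    rw [hv, getD_seg C 1 (M+1) (by omega)]
    rw [List.getD_eq_getElem _ _ (by simp; omega)]
    simp
  have h2 : vals.drop (k+1) = (List.range (M-k)).map (fun l => C.getD (k+2+l) 0) := by
    rw [hv, List.drop_take, List.drop_drop]
    have e1 : M + 1 - (k+1) = M - k := by omega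
    have e2 : 1 + (k + 1) = k + 2 := by omega
    rw [e1, e2, getD_seg C (k+2) (M-k) (by omega)]
  rw [h1, h2, List.sum_map_mul_left]

theorem pairsum_fold (l : List Int) (t r : Int) :
    l.foldl (fun (p : Int × Int) v => (p.1 + p.2 * v, p.2 + v)) (t, r)
      = (t + r * l.sum + pairsum l, r + l.sum) := by
  induction l generalizing t r with
  | nil => simp [pairsum]
  | cons v vs ih => simp [List.foldl, ih, pairsum]; constructor <;> ring

theorem main_eq (A : List Int) (n : Int) (hp : ¬ (A = [] ∧ n = 2)) :
    MenOfPassion A n = MenOfPassion_alt A n := by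
  by_cases hn : n < 2
  · have h0 : (n - 1).toNat = 0 := by omega
    simp [MenOfPassion, MenOfPassion_alt, hn, PySem.List.pyRange_one, h0]
  · obtain ⟨M, hM⟩ : ∃ M : Nat, n = (M:Int)+1 := ⟨(n-1).toNat, by omega⟩
    have hM1 : 1 ≤ M := by omega
    subst hM
    simp only [MenOfPassion, MenOfPassion_alt, if_neg (by omega : ¬ ((M:Int)+1 < 2))]
    set K : Nat := (M+1)*(M+2)/2 - 1 with hK
    have hrange : PySem.List.pyRange 1 ((M:Int)+1) 1 = (List.range M).map (fun k : Nat => 1 + (k:Int)) := by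
      have hMt : ((M:Int)+1-1).toNat = M := by omega
      rw [PySem.List.pyRange_one, hMt]
    have hbuild : (PySem.List.pyRange 1 ((M:Int)+1) 1).foldl (fun acc i =>
        (PySem.List.pyRange (i+1) ((M:Int)+1+1) 1).foldl (fun a2 _ => a2 ++ [(1:Int)]) (acc ++ [(1:Int)])) A
        = A ++ List.replicate K 1 := by
      have step1 : ∀ (acc : List Int), ∀ i ∈ PySem.List.pyRange 1 ((M:Int)+1) 1,
          (PySem.List.pyRange (i+1) ((M:Int)+1+1) 1).foldl (fun a2 _ => a2 ++ [(1:Int)]) (acc ++ [(1:Int)])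
            = acc ++ List.replicate ((((M:Int)+1) - i).toNat + 1) 1 := by
        intro acc i hi
        rw [PySem.List.foldl_append_singleton_eq_map (f := fun _ => (1:Int))]
        rw [List.map_const', PySem.List.length_pyRange_one]
        have hc : (((M:Int)+1+1) - (i+1)).toNat = (((M:Int)+1) - i).toNat := by omega
        rw [hc, List.append_assoc, List.replicate_succ]
        rfl
      rw [PySem.List.foldl_congr_mem _ _ (fun acc i => acc ++ List.replicate ((((M:Int)+1) - i).toNat + 1) 1) _ step1]
      rw [PySem.List.foldl_append_eq_flatMap]
      rw [flatMap_rep _ (fun i => (((M:Int)+1) - i).toNat + 1)]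
      congr 1
      rw [hrange, List.map_map]
      have : ((List.range M).map ((fun i => (((M:Int)+1) - i).toNat + 1) ∘ fun k : Nat => 1 + (k:Int)))
           = (List.range M).map (fun k => M - k + 1) := by
        apply List.map_congr_left
        intro k hk
        simp only [List.mem_range] at hk
        simp only [Function.comp]
        omega
      rw [this, gauss]
    rw [hbuild]
    have hBrep : PySem.List.pyRepeat [(1:Int)] (PySem.Int.floordiv (((M:Int)+1) * (((M:Int)+1) + 1)) 2 - 1) = List.replicate K 1 := by
      have h2 : ((M:Int)+1) * (((M:Int)+1) + 1) = (((M+1)*(M+2) : Nat) : Int) := by push_cast; ring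
      have h3 : (2:Int) = ((2:Nat):Int) := rfl
      rw [h2, h3, PySem.Int.floordiv_natCast, PySem.List.pyRepeat_singleton]
      congr 1
      have h4 : 1*2 ≤ (M+1)*(M+2) := Nat.mul_le_mul (by omega) (by omega)
      omega
    rw [hBrep]
    set C : List Int := A ++ List.replicate K 1 with hC
    have hKlin : 2*K + 2 = (M+1)*(M+2) := by
      have he : 2 ∣ (M+1)*(M+2) := (Nat.even_mul_succ_self (M+1)).two_dvd
      have hdm := Nat.div_mul_cancel he
      have h4 : 1*2 ≤ (M+1)*(M+2) := Nat.mul_le_mul (by omega) (by omega)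
      omega
    have hP : (M+1)*(M+2) = M*M + 3*M + 2 := by ring
    have hMM : M ≤ M*M := Nat.le_mul_of_pos_left M (by omega)
    have hlenC : M + 2 ≤ C.length := by
      rw [hC]
      simp only [List.length_append, List.length_replicate]
      by_cases hA : A = []
      · have hM2 : 2 ≤ M := by
          rcases Nat.lt_or_ge M 2 with h | h
          · exfalso; apply hp; exact ⟨hA, by omega⟩
          · exact h
        have h2M : 2*M ≤ M*M := Nat.mul_le_mul_right M hM2
        rw [hP] at hKlin
        generalize M*M = x at hKlin h2M
        omega
      · have hA1 : 1 ≤ A.length := List.length_pos_iff.mpr hA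
        rw [hP] at hKlin
        generalize M*M = x at hKlin hMM
        omega
    have hA : (PySem.List.pyRange 1 ((M:Int)+1) 1).foldl (fun s i =>
        (PySem.List.pyRange (i+1) ((M:Int)+1+1) 1).foldl (fun s2 j =>
            s2 + PySem.List.pyGetD C i 0 * PySem.List.pyGetD C j 0) s) 0
        = ((List.range M).map (fun k =>
            ((List.range (M-k)).map (fun l => C.getD (1+k) 0 * C.getD (k+2+l) 0)).sum)).sum := by
      have st : ∀ (s : Int), ∀ i ∈ PySem.List.pyRange 1 ((M:Int)+1) 1,
          (PySem.List.pyRange (i+1) ((M:Int)+1+1) 1).foldl (fun s2 j =>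
              s2 + PySem.List.pyGetD C i 0 * PySem.List.pyGetD C j 0) s
            = s + ((PySem.List.pyRange (i+1) ((M:Int)+1+1) 1).map (fun j => PySem.List.pyGetD C i 0 * PySem.List.pyGetD C j 0)).sum := by
        intro s i hi
        exact PySem.List.foldl_add _ _ _
      rw [PySem.List.foldl_congr_mem _ _ _ _ st, PySem.List.foldl_add, zero_add]
      rw [hrange, List.map_map]
      apply congrArg
      apply List.map_congr_left
      intro k hk; simp only [List.mem_range] at hk
      simp only [Function.comp]
      rw [PySem.List.pyRange_one]
      have ht : (((M:Int)+1+1) - (1+(k:Nat)+1)).toNat = M - k := by omega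
      rw [ht, List.map_map]
      apply congrArg
      apply List.map_congr_left
      intro l hl; simp only [List.mem_range] at hl
      simp only [Function.comp]
      have e1 : (1:Int)+(k:Nat) = ((1+k : Nat):Int) := by push_cast; ring
      have e2 : (((1+k : Nat):Int))+1+(l:Nat) = ((k+2+l : Nat):Int) := by push_cast; ring
      rw [e1, e2, PySem.List.pyGetD_natCast, PySem.List.pyGetD_natCast]
    have hsl : PySem.List.slice C (some 1) (some ((M:Int)+1+1)) = (C.drop 1).take (M+1) := by
      have h5 : ((M:Int)+1+1) = ((M+2 : Nat):Int) := by push_cast; ring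
      have h1 : (1:Int) = ((1:Nat):Int) := rfl
      rw [h5, h1, PySem.List.slice_natCast]
      norm_num
    rw [hA, key C M hlenC, hsl, pairsum_fold]
    simp

-- ===== VERDICT (by name: the statement is the Claim_ definition above) =====
theorem MenOfPassion_spec : Claim_equal_MenOfPassion := by
  intro A n _ hp
  unfold Spec_MenOfPassion
  exact main_eq A n hp
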